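-- pv_equiv track=rewrite | github.com/imdomlol/Orchestra | orch/dispatcher.py | _static_prefix
-- ===== SOURCE A (Python) =====
-- def _static_prefix(pattern: str) -> str:
--     wildcard_indexes = [
--         index for index in (pattern.find("*"), pattern.find("?"), pattern.find("["))
--         if index >= 0
--     ]
--     if not wildcard_indexes:
--         return pattern
--     return pattern[: min(wildcard_indexes)]
-- ===== SOURCE B (Python) =====
-- def _static_prefix(pattern: str) -> str:
--     for i, ch in enumerate(pattern):
--         if ch in ('*', '?', '['):
--             return pattern[:i]
--     return pattern
-- ===== Notes on version B (the rewrite author's own statement) =====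
-- stated objective: simpler
-- what changed: Replaces A's three whole-string find scans plus a filter and min() with a single left-to-right pass that returns the slice at the first wildcard character.
import Mathlib
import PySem

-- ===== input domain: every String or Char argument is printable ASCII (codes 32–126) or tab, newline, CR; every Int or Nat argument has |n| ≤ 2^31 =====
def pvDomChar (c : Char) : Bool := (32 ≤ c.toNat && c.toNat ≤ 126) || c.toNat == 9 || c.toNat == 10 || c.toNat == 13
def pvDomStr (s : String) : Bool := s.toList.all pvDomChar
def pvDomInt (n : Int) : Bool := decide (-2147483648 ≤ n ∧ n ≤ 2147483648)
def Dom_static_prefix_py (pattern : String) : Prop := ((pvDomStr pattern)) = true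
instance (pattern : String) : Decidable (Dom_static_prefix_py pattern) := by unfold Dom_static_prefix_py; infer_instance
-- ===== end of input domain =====

-- B replaces A's three find scans plus filter/min with one left-to-right pass (simpler).


-- ===== PORT A =====
def static_prefix_py (pattern : String) : String :=
  let wildcard_indexes :=
    [PySem.Str.find pattern "*", PySem.Str.find pattern "?", PySem.Str.find pattern "["].filter
      (fun index => decide (0 ≤ index))
  if wildcard_indexes.isEmpty then pattern
  else
    -- min(wildcard_indexes): the list is nonempty here, so min? is 'some m' and the slice is pattern[:m]
    PySem.Str.slice pattern none (PySem.List.min? wildcard_indexes (fun x => x))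

-- ===== PORT B =====
-- the 'for i, ch in enumerate(pattern)' loop of Source B, scanning the suffix with the absolute index i
def static_prefix_py_alt_go (pattern : String) : List Char → Nat → String
  | [], _ => pattern
  | ch :: rest, i =>
    if ch ∈ ['*', '?', '['] then PySem.Str.slice pattern none (some (i : Int))
    else static_prefix_py_alt_go pattern rest (i + 1)

def static_prefix_py_alt (pattern : String) : String :=
  static_prefix_py_alt_go pattern pattern.toList 0

-- ===== PRECONDITION & SPEC =====
def Spec_static_prefix_py (pattern : String) (out : String) : Prop := out = static_prefix_py_alt pattern
instance (pattern : String) (out : String) : Decidable (Spec_static_prefix_py pattern out) := by unfold Spec_static_prefix_py; infer_instance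

-- ===== CLAIM (what is proved, stated in full; the proofs are below) =====
def Claim_equal_static_prefix_py : Prop := ∀ (pattern : String), Dom_static_prefix_py pattern → Spec_static_prefix_py pattern (static_prefix_py pattern)

-- ===== LEMMAS AND PROOFS =====

def pvWild (c : Char) : Bool := c == '*' || c == '?' || c == '['

lemma singleton_prefix_drop {x : Char} {l : List Char} {i : Nat} :
    [x] <+: l.drop i ↔ l[i]? = some x := by
  rw [← List.head?_drop]
  cases l.drop i <;> simp [List.cons_prefix_cons, eq_comm]

lemma find_eq_of_first {l : List Char} {x : Char} {k : Nat}
    (hk : l[k]? = some x) (hmin : ∀ i < k, l[i]? ≠ some x) :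
    PySem.Chars.find l [x] = (k : Int) := by
  have hpre : [x] <+: l.drop k := singleton_prefix_drop.mpr hk
  have hin : [x] <:+: l :=
    (PySem.Chars.isIn_iff_infix [x] l).mp
      ((PySem.Chars.exists_prefix_drop_iff_isIn [x] l).mp ⟨k, hpre⟩)
  have h0 : 0 ≤ PySem.Chars.find l [x] := (PySem.Chars.find_nonneg_iff l [x]).mpr hin
  obtain ⟨hp, hm⟩ := PySem.Chars.find_spec (s := l) (sub := [x]) h0
  have hle : (PySem.Chars.find l [x]).toNat ≤ k := by
    by_contra hgt
    exact hm k (by omega) hpre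
  have hge : k ≤ (PySem.Chars.find l [x]).toNat := by
    by_contra hgt
    exact hmin _ (by omega) (singleton_prefix_drop.mp hp)
  omega

lemma find_eq_neg_one_of_not_at {l : List Char} {x : Char} (h : ∀ i : Nat, l[i]? ≠ some x) :
    PySem.Chars.find l [x] = -1 := by
  rw [PySem.Chars.find_eq_neg_one_iff]
  intro hin
  obtain ⟨j, hj⟩ := (PySem.Chars.exists_prefix_drop_iff_isIn [x] l).mpr
    ((PySem.Chars.isIn_iff_infix [x] l).mpr hin)
  exact h j (singleton_prefix_drop.mp hj)

lemma find_neg_or_ge {l : List Char} {x : Char} {j : Nat}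
    (hmin : ∀ i < j, ∀ c, l[i]? = some c → ¬ pvWild c) (hx : pvWild x) :
    PySem.Chars.find l [x] = -1 ∨ (j : Int) ≤ PySem.Chars.find l [x] := by
  by_cases h0 : 0 ≤ PySem.Chars.find l [x]
  · right
    obtain ⟨hp, -⟩ := PySem.Chars.find_spec (s := l) (sub := [x]) h0
    have hat := singleton_prefix_drop.mp hp
    by_contra hlt
    exact hmin _ (by omega) _ hat hx
  · left
    have := PySem.Chars.neg_one_le_find l [x]
    omega

lemma findIdx?_some_facts {p : Char → Bool} {l : List Char} {j : Nat} (h : l.findIdx? p = some j) :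
    j < l.length ∧ (∀ c, l[j]? = some c → p c) ∧ ∀ i < j, ∀ c, l[i]? = some c → ¬ p c := by
  rw [List.findIdx?_eq_some_iff_findIdx_eq] at h
  obtain ⟨hlt, hidx⟩ := h
  subst hidx
  refine ⟨hlt, ?_, ?_⟩
  · intro c hc
    have hg := List.findIdx_getElem (w := hlt)
    rw [List.getElem?_eq_getElem hlt] at hc
    cases hc; exact hg
  · intro i hi c hc hp
    have hf := List.not_of_lt_findIdx (xs := l) hi
    rw [List.getElem?_eq_getElem (by omega : i < l.length)] at hc
    cases hc; exact Bool.eq_false_iff.mp hf hp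

lemma alt_go_spec (pattern : String) (l : List Char) (i : Nat) :
    static_prefix_py_alt_go pattern l i =
      match l.findIdx? pvWild with
      | none => pattern
      | some j => PySem.Str.slice pattern none (some ((i + j : Nat) : Int)) := by
  induction l generalizing i with
  | nil => rfl
  | cons ch rest ih =>
    rw [static_prefix_py_alt_go, List.findIdx?_cons]
    by_cases hw : ch ∈ ['*', '?', '[']
    · have hw' : pvWild ch = true := by simp [pvWild] at hw ⊢; tauto
      simp [hw, hw']
    · have hw' : pvWild ch = false := by simp [pvWild] at hw ⊢; tauto
      rw [if_neg hw, hw', ih]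
      cases hfi : rest.findIdx? pvWild with
      | none => simp
      | some j =>
        simp only [Option.map_some]
        have h' : (i + 1 + j : Nat) = (i + (j + 1) : Nat) := by omega
        simp [h']

lemma main_eq (pattern : String) : static_prefix_py pattern = static_prefix_py_alt pattern := by
  unfold static_prefix_py static_prefix_py_alt
  rw [alt_go_spec]
  have hb1 : PySem.Str.find pattern "*" = PySem.Chars.find pattern.toList ['*'] := by simp
  have hb2 : PySem.Str.find pattern "?" = PySem.Chars.find pattern.toList ['?'] := by simp
  have hb3 : PySem.Str.find pattern "[" = PySem.Chars.find pattern.toList ['['] := by simp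
  cases hfi : pattern.toList.findIdx? pvWild with
  | none =>
    have hno : ∀ c ∈ pattern.toList, ¬ pvWild c := by
      rw [List.findIdx?_eq_none_iff] at hfi; simpa using hfi
    have hnone : ∀ x : Char, pvWild x → PySem.Chars.find pattern.toList [x] = -1 := by
      intro x hx
      apply find_eq_neg_one_of_not_at
      intro i hi
      exact hno x (List.mem_of_getElem? hi) hx
    have h1 := hnone '*' (by decide)
    have h2 := hnone '?' (by decide)
    have h3 := hnone '[' (by decide)
    show (if _ then _ else _) = _
    rw [hb1, hb2, hb3, h1, h2, h3]
    simp
  | some j =>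
    obtain ⟨hlt, hat, hmin⟩ := findIdx?_some_facts hfi
    obtain ⟨c, hc⟩ : ∃ c, pattern.toList[j]? = some c := ⟨_, List.getElem?_eq_getElem hlt⟩
    have hcw : pvWild c := hat c hc
    -- the wildcard character found at position j has its FIRST occurrence exactly at j
    have hcfind : PySem.Chars.find pattern.toList [c] = (j : Int) := by
      apply find_eq_of_first hc
      intro i hi heq
      exact hmin i hi c heq hcw
    have h1 := find_neg_or_ge (l := pattern.toList) (x := '*') hmin (by decide)
    have h2 := find_neg_or_ge (l := pattern.toList) (x := '?') hmin (by decide)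
    have h3 := find_neg_or_ge (l := pattern.toList) (x := '[') hmin (by decide)
    have hone : PySem.Chars.find pattern.toList ['*'] = (j : Int) ∨
        PySem.Chars.find pattern.toList ['?'] = (j : Int) ∨
        PySem.Chars.find pattern.toList ['['] = (j : Int) := by
      have hcw' := hcw
      simp [pvWild] at hcw'
      rcases hcw' with (h | h) | h <;> subst h
      · exact Or.inl hcfind
      · exact Or.inr (Or.inl hcfind)
      · exact Or.inr (Or.inr hcfind)
    show (if _ then _ else _) = _
    rw [hb1, hb2, hb3]
    have hj0 : (0 : Int) ≤ (j : Int) := Int.natCast_nonneg j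
    have hjmem : ((j : Int)) ∈
        [PySem.Chars.find pattern.toList ['*'], PySem.Chars.find pattern.toList ['?'],
          PySem.Chars.find pattern.toList ['[']].filter (fun index => decide (0 ≤ index)) := by
      rcases hone with h | h | h <;> rw [← h] <;>
        exact List.mem_filter.mpr ⟨by simp, by rw [h]; exact decide_eq_true hj0⟩
    have hLne := List.ne_nil_of_mem hjmem
    rw [if_neg (by simpa [List.isEmpty_iff] using hLne)]
    cases hm : PySem.List.min?
        ([PySem.Chars.find pattern.toList ['*'], PySem.Chars.find pattern.toList ['?'],
          PySem.Chars.find pattern.toList ['[']].filter (fun index => decide (0 ≤ index)))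
        (fun x => x) with
    | none => exact absurd ((PySem.List.min?_eq_none_iff _ _).mp hm) hLne
    | some m =>
      have hmem := PySem.List.min?_mem hm
      have hmle := PySem.List.min?_isMin hm _ hjmem
      obtain ⟨hm3, hm0⟩ := List.mem_filter.mp hmem
      have hm0' : (0 : Int) ≤ m := of_decide_eq_true hm0
      have hmj : m = (j : Int) := by
        simp only [List.mem_cons, List.not_mem_nil, or_false] at hm3
        rcases h1 with h1 | h1 <;> rcases h2 with h2 | h2 <;> rcases h3 with h3 | h3 <;>
          rcases hm3 with h | h | h <;> omega
      rw [hmj]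
      simp

-- ===== VERDICT (by name: the statement is the Claim_ definition above) =====
theorem static_prefix_py_spec : Claim_equal_static_prefix_py := by
  intro pattern _
  show _ = _
  exact main_eq pattern
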